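-- pv_equiv track=rewrite | github.com/Del161/Pythonfiles | Opdracht2.py | amino_acids
-- ===== SOURCE A (Python) =====
-- amino_acids_dict = {
--      'CYS': 'C', 'ASP': 'D', 'SER': 'S', 'GLN': 'Q', 'LYS': 'K',
--      'ILE': 'I', 'PRO': 'P', 'THR': 'T', 'PHE': 'F', 'ASN': 'N',
--      'GLY': 'G', 'HIS': 'H', 'LEU': 'L', 'ARG': 'R', 'TRP': 'W',
--      'ALA': 'A', 'VAL': 'V', 'GLU': 'E', 'TYR': 'Y', 'MET': 'M',
--      "UNK" : "*"
--      }
--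
-- def amino_acids(list_lines):
--     #pre defined variables whoo
--     amino_acid_string = ""
--     aminoacids_end = ""
--
--     #make a string of the aminoacids
--     for lines in list_lines:
--         if lines.startswith("SEQRES"):
--             amino_acids_list = lines[19:71].split()
--             for aminoacids in amino_acids_list:
--                 amino_acid_string += amino_acids_dict[aminoacids]
--
--     #devide aminoacids in solid lines of 70
--     for devided_item in range(0, len(amino_acid_string), 70):
--         aminoacids_end += "".join(amino_acid_string[devided_item: devided_item + 70])
--         aminoacids_end += "\n"
--     return aminoacids_end, amino_acid_string
-- ===== SOURCE B (Python) =====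
-- amino_acids_dict = {
--      'CYS': 'C', 'ASP': 'D', 'SER': 'S', 'GLN': 'Q', 'LYS': 'K',
--      'ILE': 'I', 'PRO': 'P', 'THR': 'T', 'PHE': 'F', 'ASN': 'N',
--      'GLY': 'G', 'HIS': 'H', 'LEU': 'L', 'ARG': 'R', 'TRP': 'W',
--      'ALA': 'A', 'VAL': 'V', 'GLU': 'E', 'TYR': 'Y', 'MET': 'M',
--      "UNK": "*"
--      }
--
--
-- def amino_acids(list_lines):
--     # Single pass: translate codes and flush a full 70-char line as soon as
--     # the buffer fills, instead of a second indexed chunking pass afterwards.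
--     chunks = []
--     buf = ""
--     for line in list_lines:
--         if line.startswith("SEQRES"):
--             for code in line[19:71].split():
--                 buf += amino_acids_dict[code]
--                 if len(buf) == 70:
--                     chunks.append(buf)
--                     buf = ""
--     seq = "".join(chunks) + buf
--     end = "".join(c + "\n" for c in chunks) + (buf + "\n" if buf else "")
--     return end, seq
-- ===== Notes on version B (the rewrite author's own statement) =====
-- stated objective: alternative
-- what changed: B merges translation and formatting into one pass: it flushes a 70-character output line the moment the running buffer fills, instead of A's second indexed range(0,len,70) chunking pass over the completed string; Pre_ excludes inputs where A raises KeyError on a residue code not in the dictionary.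
import Mathlib
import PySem

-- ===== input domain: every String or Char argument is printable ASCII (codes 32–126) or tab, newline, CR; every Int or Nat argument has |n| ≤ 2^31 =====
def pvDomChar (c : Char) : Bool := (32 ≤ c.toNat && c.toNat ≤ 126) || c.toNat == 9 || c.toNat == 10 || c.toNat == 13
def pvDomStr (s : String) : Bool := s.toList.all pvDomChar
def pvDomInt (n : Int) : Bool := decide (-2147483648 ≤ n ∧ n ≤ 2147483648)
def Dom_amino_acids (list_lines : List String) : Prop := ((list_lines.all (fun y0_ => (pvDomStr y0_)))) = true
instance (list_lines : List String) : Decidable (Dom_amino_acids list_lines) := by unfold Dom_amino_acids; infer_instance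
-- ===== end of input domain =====

-- B replaces A's second indexed chunking pass by a single pass that flushes each
-- 70-character output line as soon as the running buffer fills (alternative decomposition).

-- ===== PORT A =====
def aaDict : PySem.Dict String String := PySem.Dict.ofList
  [("CYS","C"),("ASP","D"),("SER","S"),("GLN","Q"),("LYS","K"),
   ("ILE","I"),("PRO","P"),("THR","T"),("PHE","F"),("ASN","N"),
   ("GLY","G"),("HIS","H"),("LEU","L"),("ARG","R"),("TRP","W"),
   ("ALA","A"),("VAL","V"),("GLU","E"),("TYR","Y"),("MET","M"),
   ("UNK","*")]

-- dict[code] raises KeyError on a missing key; Pre_ excludes that, so getD's default is never used.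
-- "".join(s[i:i+70]) over a string is the slice itself (joining its characters).
def amino_acids (list_lines : List String) : String × String :=
  let s : List Char := list_lines.foldl (fun acc line =>
      if PySem.Str.startswith line "SEQRES" then
        (PySem.Str.split₀ (PySem.Str.slice line (some 19) (some 71))).foldl
          (fun acc code => acc ++ (PySem.Dict.getD aaDict code "").toList) acc
      else acc) []
  let e : List Char := (PySem.List.pyRange 0 (s.length : Int) 70).foldl
      (fun acc i => acc ++ (PySem.List.slice s (some i) (some (i + 70))) ++ ['\n']) []
  (String.ofList e, String.ofList s)

-- ===== PORT B =====
def stepB (st : List (List Char) × List Char) (piece : List Char) :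
    List (List Char) × List Char :=
  let buf := st.2 ++ piece
  if buf.length = 70 then (st.1 ++ [buf], []) else (st.1, buf)

def amino_acids_alt (list_lines : List String) : String × String :=
  let st := list_lines.foldl (fun st line =>
      if PySem.Str.startswith line "SEQRES" then
        (PySem.Str.split₀ (PySem.Str.slice line (some 19) (some 71))).foldl
          (fun st code => stepB st (PySem.Dict.getD aaDict code "").toList) st
      else st) ([], [])
  let seq : List Char := st.1.flatten ++ st.2
  let e : List Char := (st.1.map (fun c => c ++ ['\n'])).flatten ++
      (if st.2 = [] then [] else st.2 ++ ['\n'])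
  (String.ofList e, String.ofList seq)

-- ===== PRECONDITION & SPEC =====
-- Pre_ excludes exactly the inputs where Python A raises KeyError: a SEQRES line
-- whose columns 19:71 contain a token that is not a key of the dictionary.
def Pre_amino_acids (list_lines : List String) : Prop :=
  ∀ line ∈ list_lines, PySem.Str.startswith line "SEQRES" = true →
    ∀ code ∈ PySem.Str.split₀ (PySem.Str.slice line (some 19) (some 71)),
      (PySem.Dict.get? aaDict code).isSome = true
instance (list_lines : List String) : Decidable (Pre_amino_acids list_lines) := by
  unfold Pre_amino_acids; infer_instance
def pvWitness_amino_acids : List String := ["SEQRES   1 A    2  MET LYS"]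

def Spec_amino_acids (list_lines : List String) (out : String × String) : Prop := out = amino_acids_alt list_lines
instance (list_lines : List String) (out : String × String) : Decidable (Spec_amino_acids list_lines out) := by unfold Spec_amino_acids; infer_instance

-- ===== CLAIM (what is proved, stated in full; the proofs are below) =====
def Claim_equal_amino_acids : Prop := ∀ (list_lines : List String), Dom_amino_acids list_lines → Pre_amino_acids list_lines → Spec_amino_acids list_lines (amino_acids list_lines)

-- ===== LEMMAS AND PROOFS =====

-- the translated single-letter pieces, one per SEQRES token, in order
def pieces (list_lines : List String) : List (List Char) :=
  list_lines.flatMap (fun line =>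
    if PySem.Str.startswith line "SEQRES" then
      (PySem.Str.split₀ (PySem.Str.slice line (some 19) (some 71))).map
        (fun code => (PySem.Dict.getD aaDict code "").toList)
    else [])

-- A's and B's identical nested loops, as a fold over the flat piece list
theorem foldl_nested {σ : Type} (g : σ → List Char → σ) (lines : List String) (init : σ) :
    lines.foldl (fun st line =>
      if PySem.Str.startswith line "SEQRES" then
        (PySem.Str.split₀ (PySem.Str.slice line (some 19) (some 71))).foldl
          (fun st code => g st (PySem.Dict.getD aaDict code "").toList) st
      else st) init
    = (pieces lines).foldl g init := by
  induction lines generalizing init with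
  | nil => rfl
  | cons l t ih =>
    simp only [pieces, List.foldl_cons, List.flatMap_cons, List.foldl_append]
    split
    · rw [ih, List.foldl_map]; rfl
    · rw [ih]; rfl

theorem piece_len (code : String) : (PySem.Dict.getD aaDict code "").toList.length ≤ 1 := by
  unfold PySem.Dict.getD PySem.Dict.get?
  cases hf : aaDict.items.find? (fun p => p.1 == code) with
  | none => simp
  | some p =>
    have hm := List.mem_of_find?_eq_some hf
    have hall : ∀ q ∈ aaDict.items, q.2.toList.length = 1 := by decide
    simp [hall p hm]

theorem pieces_len (lines : List String) : ∀ p ∈ pieces lines, p.length ≤ 1 := by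
  intro p hp
  simp only [pieces, List.mem_flatMap] at hp
  obtain ⟨line, -, hp⟩ := hp
  split at hp
  · obtain ⟨code, -, rfl⟩ := List.mem_map.mp hp
    exact piece_len code
  · simp at hp

-- greedy 70-chunking of a character list (last chunk may be short)
def chunkRec (cs : List Char) : List (List Char) :=
  if h : cs = [] then [] else cs.take 70 :: chunkRec (cs.drop 70)
termination_by cs.length
decreasing_by
  simp only [List.length_drop]
  have := List.length_pos_iff.mpr h
  omega

theorem flatten_chunkRec (cs : List Char) : (chunkRec cs).flatten = cs := by
  rw [chunkRec]
  split
  · simp [*]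
  · simp [flatten_chunkRec (cs.drop 70)]
termination_by cs.length
decreasing_by
  simp only [List.length_drop]
  have := List.length_pos_iff.mpr (by assumption)
  omega

theorem chunkRec_small (cs : List Char) (h : cs.length ≤ 70) :
    chunkRec cs = if cs = [] then [] else [cs] := by
  rw [chunkRec]
  split
  · rfl
  · rw [List.take_of_length_le h, List.drop_eq_nil_of_le h, chunkRec]
    simp

theorem chunkRec_append_full (cs ds : List Char) (h : cs.length = 70) :
    chunkRec (cs ++ ds) = cs :: chunkRec ds := by
  rw [chunkRec]
  have hne : cs ++ ds ≠ [] := by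
    intro he
    have : cs.length = 0 := by simp [List.append_eq_nil_iff.mp he]
    omega
  rw [dif_neg hne]
  congr 1
  · rw [← h, List.take_left]
  · congr 1
    rw [← h, List.drop_left]

-- B's chunk list accumulates by append
theorem stepB_shift : ∀ (ps : List (List Char)) (chs : List (List Char)) (buf : List Char),
    ps.foldl stepB (chs, buf) =
      (chs ++ (ps.foldl stepB ([], buf)).1, (ps.foldl stepB ([], buf)).2) := by
  intro ps
  induction ps with
  | nil => intro chs buf; simp
  | cons p t ih =>
    intro chs buf
    simp only [List.foldl_cons, stepB]
    split
    · simp only [List.nil_append]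
      rw [ih (chs ++ [buf ++ p]) [], ih [buf ++ p] []]
      simp
    · exact ih chs (buf ++ p)

-- the single-pass state is exactly the greedy chunking of everything seen so far
theorem stepB_chunk : ∀ (ps : List (List Char)), (∀ p ∈ ps, p.length ≤ 1) →
    ∀ (buf : List Char), buf.length < 70 →
    chunkRec (buf ++ ps.flatten) =
      (ps.foldl stepB ([], buf)).1 ++
        (if (ps.foldl stepB ([], buf)).2 = [] then [] else [(ps.foldl stepB ([], buf)).2]) := by
  intro ps
  induction ps with
  | nil =>
    intro _ buf hb
    simp only [List.flatten_nil, List.append_nil, List.foldl_nil]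
    rw [chunkRec_small buf (by omega)]
    split <;> simp
  | cons p t ih =>
    intro hlen buf hb
    have hp : p.length ≤ 1 := hlen p (by simp)
    have ht : ∀ q ∈ t, q.length ≤ 1 := fun q hq => hlen q (by simp [hq])
    simp only [List.foldl_cons, stepB, List.flatten_cons]
    split
    · rename_i h70
      simp only [List.nil_append]
      rw [stepB_shift t [buf ++ p] []]
      rw [← List.append_assoc, chunkRec_append_full (buf ++ p) t.flatten h70]
      have h2 := ih ht [] (by simp)
      simp only [List.nil_append] at h2
      rw [h2]
      simp
    · rename_i h70
      have : (buf ++ p).length < 70 := by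
        simp only [List.length_append] at *
        omega
      rw [← List.append_assoc]
      exact ih ht (buf ++ p) this

-- A's range(0, len, 70) loop renders the greedy chunking
theorem range_chunk_nat : ∀ (m : Nat) (cs acc : List Char), m = (cs.length + 69) / 70 →
    (List.range m).foldl (fun a k => a ++ ((cs.drop (70 * k)).take 70) ++ ['\n']) acc
      = acc ++ ((chunkRec cs).map (fun c => c ++ ['\n'])).flatten := by
  intro m
  induction m with
  | zero =>
    intro cs acc hm
    have : cs.length = 0 := by omega
    have : cs = [] := List.length_eq_zero_iff.mp this
    subst this
    rw [chunkRec]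
    simp
  | succ m ih =>
    intro cs acc hm
    have hpos : 0 < cs.length := by omega
    rw [List.range_succ_eq_map]
    simp only [List.foldl_cons, List.foldl_map, Nat.mul_zero, List.drop_zero]
    have hstep : (fun (a : List Char) (k : Nat) => a ++ ((cs.drop (70 * (k + 1))).take 70) ++ ['\n'])
          = (fun (a : List Char) (k : Nat) => a ++ (((cs.drop 70).drop (70 * k)).take 70) ++ ['\n']) := by
      funext a k
      rw [List.drop_drop, Nat.mul_add, Nat.mul_one, Nat.add_comm (70 * k) 70]
    calc (List.range m).foldl (fun a k => a ++ ((cs.drop (70 * (k + 1))).take 70) ++ ['\n'])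
            (acc ++ cs.take 70 ++ ['\n'])
        = (List.range m).foldl (fun a k => a ++ (((cs.drop 70).drop (70 * k)).take 70) ++ ['\n'])
            (acc ++ cs.take 70 ++ ['\n']) := by rw [hstep]
      _ = (acc ++ cs.take 70 ++ ['\n']) ++ ((chunkRec (cs.drop 70)).map (fun c => c ++ ['\n'])).flatten := by
          apply ih
          simp only [List.length_drop]
          omega
      _ = acc ++ ((chunkRec cs).map (fun c => c ++ ['\n'])).flatten := by
          conv_rhs => rw [chunkRec]
          rw [dif_neg (List.ne_nil_of_length_pos hpos)]
          simp

theorem range_chunk (cs : List Char) :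
    (PySem.List.pyRange 0 (cs.length : Int) 70).foldl
      (fun acc i => acc ++ (PySem.List.slice cs (some i) (some (i + 70))) ++ ['\n']) []
    = ((chunkRec cs).map (fun c => c ++ ['\n'])).flatten := by
  rw [PySem.List.pyRange_of_pos 0 (cs.length : Int) (by norm_num), List.foldl_map]
  have hsl : ∀ k : Nat, PySem.List.slice cs (some ((0 : Int) + 70 * (k : Int)))
      (some ((0 : Int) + 70 * (k : Int) + 70)) = (cs.drop (70 * k)).take 70 := by
    intro k
    rw [PySem.List.slice_toNat cs (by positivity) (by positivity)]
    congr 2 <;> omega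
  simp only [hsl]
  rw [range_chunk_nat _ cs []
    (by split_ifs with h <;> omega), List.nil_append]

-- ===== VERDICT (by name: the statement is the Claim_ definition above) =====
theorem amino_acids_spec : Claim_equal_amino_acids := by
  intro lines _ _
  unfold Spec_amino_acids
  simp only [amino_acids, amino_acids_alt]
  have hA : lines.foldl (fun acc line =>
      if PySem.Str.startswith line "SEQRES" then
        (PySem.Str.split₀ (PySem.Str.slice line (some 19) (some 71))).foldl
          (fun acc code => acc ++ (PySem.Dict.getD aaDict code "").toList) acc
      else acc) ([] : List Char) = (pieces lines).flatten := by
    refine (foldl_nested (fun (a b : List Char) => a ++ b) lines []).trans ?_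
    exact (PySem.List.foldl_append_eq_flatMap id (pieces lines) []).trans (by simp)
  have hB : lines.foldl (fun st line =>
      if PySem.Str.startswith line "SEQRES" then
        (PySem.Str.split₀ (PySem.Str.slice line (some 19) (some 71))).foldl
          (fun st code => stepB st (PySem.Dict.getD aaDict code "").toList) st
      else st) (([], []) : List (List Char) × List Char)
      = (pieces lines).foldl stepB ([], []) :=
    foldl_nested stepB lines ([], [])
  rw [hA, hB, range_chunk]
  have hchunk := stepB_chunk (pieces lines) (pieces_len lines) [] (by simp)
  simp only [List.nil_append] at hchunk
  set q := (pieces lines).foldl stepB ([], []) with hq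
  have hflat : (pieces lines).flatten = q.1.flatten ++ q.2 := by
    conv_lhs => rw [← flatten_chunkRec (pieces lines).flatten, hchunk]
    by_cases h2 : q.2 = [] <;> simp [h2]
  rw [hchunk]
  by_cases h2 : q.2 = [] <;>
    simp [h2, hflat, List.map_append, List.flatten_append]
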